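-- pv_equiv track=rewrite | github.com/LegionMammal978/05AB1E | commands.py | is_digit_value
-- ===== SOURCE A (Python) =====
-- numbers = list("0123456789")
--
-- def is_digit_value(value):
--     value = str(value)
--     try:
--         for X in value:
--             if numbers.__contains__(X):
--                 continue
--             else:
--                 return False
--         return True
--     except:
--         return False
-- ===== SOURCE B (Python) =====
-- def is_digit_value(value):
--     # all-digits iff stripping digits from both ends leaves the empty string
--     return str(value).strip("0123456789") == ""
-- ===== Notes on version B (the rewrite author's own statement) =====
-- stated objective: idiomatic
-- what changed: Instead of scanning every character for membership, B strips digit characters from both ends with str.strip and tests whether the remainder is empty (a string is all digits iff stripping digits leaves nothing).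
import Mathlib
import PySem

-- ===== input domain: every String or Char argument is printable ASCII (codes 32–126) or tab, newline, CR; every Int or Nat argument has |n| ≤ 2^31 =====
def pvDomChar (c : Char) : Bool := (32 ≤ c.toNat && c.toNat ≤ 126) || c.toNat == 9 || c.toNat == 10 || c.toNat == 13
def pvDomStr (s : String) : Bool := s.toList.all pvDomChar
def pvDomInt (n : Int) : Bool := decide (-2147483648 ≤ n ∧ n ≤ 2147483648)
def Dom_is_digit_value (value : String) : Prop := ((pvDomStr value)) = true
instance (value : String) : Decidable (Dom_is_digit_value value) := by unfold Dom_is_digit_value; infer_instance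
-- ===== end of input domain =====

-- B replaces A's per-character membership loop by stripping digit characters from both ends and testing emptiness (idiomatic; same cost).


-- ===== PORT A =====
-- numbers = list("0123456789")
def pvNumbers : List Char := "0123456789".toList

-- the for-loop with its early 'return False'
def is_digit_value_loop : List Char → Bool
  | [] => true
  | c :: cs => if pvNumbers.contains c then is_digit_value_loop cs else false

def is_digit_value (value : String) : Bool :=
  is_digit_value_loop value.toList

-- ===== PORT B =====
-- str(value).strip("0123456789") == ""
def is_digit_value_alt (value : String) : Bool :=
  PySem.Str.stripChars value "0123456789" == ""

-- ===== PRECONDITION & SPEC =====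
def Spec_is_digit_value (value : String) (out : Bool) : Prop := out = is_digit_value_alt value
instance (value : String) (out : Bool) : Decidable (Spec_is_digit_value value out) := by unfold Spec_is_digit_value; infer_instance

-- ===== CLAIM =====
def Claim_equal_is_digit_value : Prop := ∀ (value : String), Dom_is_digit_value value → Spec_is_digit_value value (is_digit_value value)

-- ===== LEMMAS AND PROOFS =====
theorem loop_iff (l : List Char) : is_digit_value_loop l = true ↔ ∀ c ∈ l, pvNumbers.contains c := by
  induction l with
  | nil => simp [is_digit_value_loop]
  | cons c cs ih =>
    simp only [is_digit_value_loop, List.mem_cons]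
    by_cases h : pvNumbers.contains c <;> simp_all

theorem stripChars_nil_iff (s chars : List Char) :
    PySem.Chars.stripChars s chars = [] ↔ ∀ c ∈ s, chars.contains c := by
  simp only [PySem.Chars.stripChars, List.reverse_eq_nil_iff, List.dropWhile_eq_nil_iff,
    List.mem_reverse]
  constructor
  · intro h c hc
    by_cases hd : List.dropWhile (fun c => chars.contains c) s = []
    · rw [List.dropWhile_eq_nil_iff] at hd
      exact hd c hc
    · exfalso
      have hhead := List.head_dropWhile_not (fun c => chars.contains c) (l := s) hd
      have hmem := h _ (List.head_mem hd)
      simp only [hmem] at hhead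
      simp at hhead
  · intro h c hc
    exact h c (List.dropWhile_subset _ hc)

-- ===== VERDICT =====
theorem is_digit_value_spec : Claim_equal_is_digit_value := by
  intro value _
  unfold Spec_is_digit_value is_digit_value is_digit_value_alt
  rw [Bool.eq_iff_iff, beq_iff_eq, loop_iff, ← String.toList_inj,
    PySem.Str.toList_stripChars]
  simp only [pvNumbers]
  simpa using (stripChars_nil_iff value.toList "0123456789".toList).symm
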